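-- pv_equiv track=rewrite | github.com/alexmuller/advent-of-code-2023 | day-02/main.py | fewest_cubes_per_game
-- ===== SOURCE A (Python) =====
-- def fewest_cubes_per_game(game):
--     fewest = {}
--
--     for round in game['rounds']:
--         for colour in round.keys():
--             if not colour in fewest or fewest[colour] <= round[colour]:
--                 fewest[colour] = round[colour]
--
--     if len(fewest.keys()) < 3:
--         raise RuntimeError('Not all colours played in game')
--
--     return fewest
-- ===== SOURCE B (Python) =====
-- def fewest_cubes_per_game(game):
--     rounds = game['rounds']
--     colours = list(dict.fromkeys(c for r in rounds for c in r))
--     if len(colours) < 3: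
--         raise RuntimeError('Not all colours played in game')
--     return {c: max(r[c] for r in rounds if c in r) for c in colours}
-- ===== Notes on version B (the rewrite author's own statement) =====
-- stated objective: alternative
-- what changed: A threads one running-maximum dict through a nested loop over every (round, colour) entry; B first collects the ordered set of colours played and then builds the result with one max-reduction per colour over the rounds containing it.
import Mathlib
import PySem

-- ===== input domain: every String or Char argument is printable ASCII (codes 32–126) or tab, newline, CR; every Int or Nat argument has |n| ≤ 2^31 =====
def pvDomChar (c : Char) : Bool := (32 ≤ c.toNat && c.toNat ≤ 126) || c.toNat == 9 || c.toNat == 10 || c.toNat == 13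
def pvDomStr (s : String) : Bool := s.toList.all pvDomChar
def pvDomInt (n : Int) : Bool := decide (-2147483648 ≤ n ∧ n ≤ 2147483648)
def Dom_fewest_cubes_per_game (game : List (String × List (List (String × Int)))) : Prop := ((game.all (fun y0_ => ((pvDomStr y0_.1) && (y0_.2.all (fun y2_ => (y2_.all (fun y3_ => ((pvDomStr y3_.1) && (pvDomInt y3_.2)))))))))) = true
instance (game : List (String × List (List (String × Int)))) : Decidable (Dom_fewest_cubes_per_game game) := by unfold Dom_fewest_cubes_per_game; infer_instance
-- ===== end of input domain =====

-- B replaces A's running-maximum dict, updated per (round, colour) entry, by a two-pass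
-- reduce: first the ordered set of colours played, then one max-reduction per colour over
-- the rounds containing it (objective: alternative decomposition, same asymptotic cost).

-- ===== PORT A =====
def fewest_cubes_per_game (game : List (String × List (List (String × Int)))) : List (String × Int) :=
  -- game['rounds']; Pre_ guarantees the key is present (else Python raises KeyError)
  let rounds := (PySem.Dict.ofList game).getD "rounds" []
  -- fewest = {}; for round in rounds: for colour in round.keys(): …
  (rounds.foldl (fun fewest round =>
      let rd := PySem.Dict.ofList round
      rd.keys.foldl (fun fewest colour =>
        if !(fewest.contains colour) || fewest.getD colour 0 ≤ rd.getD colour 0 then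
          fewest.insert colour (rd.getD colour 0)
        else fewest) fewest) PySem.Dict.empty).items
  -- the "len(fewest) < 3: raise RuntimeError" branch is excluded by Pre_

-- ===== PORT B =====
def fewest_cubes_per_game_alt (game : List (String × List (List (String × Int)))) : List (String × Int) :=
  let rounds := (PySem.Dict.ofList game).getD "rounds" []
  -- colours = list(dict.fromkeys(c for r in rounds for c in r))
  let colours := PySem.List.dedup (rounds.flatMap (fun round => (PySem.Dict.ofList round).keys))
  -- the "len(colours) < 3: raise RuntimeError" branch is excluded by Pre_
  -- {c: max(r[c] for r in rounds if c in r) for c in colours}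
  colours.map (fun c =>
    (c, match PySem.List.max? (rounds.filterMap (fun round => (PySem.Dict.ofList round).get? c)) (fun v => v) with
        | some m => m
        | none => 0))

-- ===== PRECONDITION & SPEC =====
-- Pre_ excludes exactly the inputs on which the Python raises: a game without a 'rounds'
-- key (KeyError in A) and games whose rounds play fewer than three distinct colours
-- (RuntimeError in both A and B).
def Pre_fewest_cubes_per_game (game : List (String × List (List (String × Int)))) : Prop :=
  (PySem.Dict.ofList game).contains "rounds" = true ∧
  3 ≤ (PySem.List.dedup (((PySem.Dict.ofList game).getD "rounds" []).flatMap
        (fun round => (PySem.Dict.ofList round).keys))).length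
instance (game : List (String × List (List (String × Int)))) : Decidable (Pre_fewest_cubes_per_game game) := by unfold Pre_fewest_cubes_per_game; infer_instance

def pvWitness_fewest_cubes_per_game : (List (String × List (List (String × Int)))) :=
  [("rounds", [[("red", 1), ("green", 2)], [("blue", 3), ("red", 4)]])]

def Spec_fewest_cubes_per_game (game : List (String × List (List (String × Int)))) (out : List (String × Int)) : Prop := out = fewest_cubes_per_game_alt game
instance (game : List (String × List (List (String × Int)))) (out : List (String × Int)) : Decidable (Spec_fewest_cubes_per_game game out) := by unfold Spec_fewest_cubes_per_game; infer_instance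

-- ===== CLAIM (what is proved, stated in full; the proofs are below) =====
def Claim_equal_fewest_cubes_per_game : Prop := ∀ (game : List (String × List (List (String × Int)))), Dom_fewest_cubes_per_game game → Pre_fewest_cubes_per_game game → Spec_fewest_cubes_per_game game (fewest_cubes_per_game game)

-- ===== LEMMAS AND PROOFS =====

-- A's inner loop body, abstracted over the current round's dict rd
def pvUpd (rd : PySem.Dict String Int) (f : PySem.Dict String Int) (c : String) : PySem.Dict String Int :=
  if !(f.contains c) || f.getD c 0 ≤ rd.getD c 0 then f.insert c (rd.getD c 0) else f

-- how one update step changes one lookup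
def pvMerge (o : Option Int) (v : Int) : Option Int :=
  some (match o with | none => v | some w => max w v)

-- the values round[c] for the rounds containing c, in round order
def pvVals (rounds : List (List (String × Int))) (c : String) : List Int :=
  rounds.filterMap (fun round => (PySem.Dict.ofList round).get? c)

theorem pvUpd_keys (rd f : PySem.Dict String Int) (c : String) :
    (pvUpd rd f c).keys = PySem.Set.add f.keys c := by
  unfold pvUpd
  by_cases h : f.contains c = true
  · have hm : c ∈ f.keys := (PySem.Dict.contains_iff_mem_keys _ _).1 h
    rw [PySem.Set.add_of_mem hm]
    split_ifs with h2
    · exact PySem.Dict.keys_insert_of_contains f _ h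
    · rfl
  · have hm : c ∉ f.keys := fun hc => h ((PySem.Dict.contains_iff_mem_keys _ _).2 hc)
    rw [PySem.Set.add_of_not_mem hm]
    simp only [h]
    simp [PySem.Dict.keys_insert_of_not_contains f _ (by simpa using h)]

theorem pvUpd_get_self (rd f : PySem.Dict String Int) (c : String) :
    (pvUpd rd f c).get? c = pvMerge (f.get? c) (rd.getD c 0) := by
  unfold pvUpd pvMerge
  by_cases h : f.contains c = true
  · have hs : (f.get? c).isSome := by rw [← PySem.Dict.contains_eq_isSome_get?]; exact h
    obtain ⟨w, hw⟩ := Option.isSome_iff_exists.1 hs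
    have hgd : f.getD c 0 = w := PySem.Dict.getD_of_get?_eq_some f 0 hw
    rw [hw]
    by_cases h2 : f.getD c 0 ≤ rd.getD c 0
    · simp only [h, h2, if_pos, Bool.not_true, Bool.false_or, decide_true]
      rw [PySem.Dict.get?_insert_self]
      have : max w (rd.getD c 0) = rd.getD c 0 := max_eq_right (hgd ▸ h2)
      simp [this]
    · simp only [h, h2, Bool.not_true, Bool.false_or, decide_false, if_neg, Bool.false_eq_true,
        not_false_eq_true, hw]
      have : max w (rd.getD c 0) = w := by rw [← hgd] at *; exact max_eq_left (by omega)
      simp [this]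
  · have hn : f.get? c = none := (PySem.Dict.get?_eq_none_iff_contains f c).2 (by simpa using h)
    simp only [h, hn, Bool.not_false]
    simp [PySem.Dict.get?_insert_self]

theorem pvUpd_get_ne (rd f : PySem.Dict String Int) (c k : String) (h : c ≠ k) :
    (pvUpd rd f k).get? c = f.get? c := by
  unfold pvUpd
  split_ifs with h2
  · exact PySem.Dict.get?_insert_of_ne f _ h
  · rfl

theorem pvInner_keys (rd : PySem.Dict String Int) (ks : List String) (f : PySem.Dict String Int) :
    (ks.foldl (pvUpd rd) f).keys = PySem.Set.update f.keys ks := by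
  induction ks generalizing f with
  | nil => rfl
  | cons k t ih =>
      rw [List.foldl_cons, ih, pvUpd_keys]
      simp [PySem.Set.update]

theorem pvInner_get_not_mem (rd : PySem.Dict String Int) (ks : List String) (c : String)
    (h : c ∉ ks) (f : PySem.Dict String Int) :
    (ks.foldl (pvUpd rd) f).get? c = f.get? c := by
  induction ks generalizing f with
  | nil => rfl
  | cons k t ih =>
      rw [List.foldl_cons, ih (by simp_all), pvUpd_get_ne _ _ _ _ (by simp_all)]

theorem pvInner_get_mem (rd : PySem.Dict String Int) (ks : List String) (c : String)
    (hnd : ks.Nodup) (h : c ∈ ks) (f : PySem.Dict String Int) :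
    (ks.foldl (pvUpd rd) f).get? c = pvMerge (f.get? c) (rd.getD c 0) := by
  induction ks generalizing f with
  | nil => simp at h
  | cons k t ih =>
      rw [List.foldl_cons]
      rcases eq_or_ne c k with rfl | hck
      · rw [pvInner_get_not_mem _ _ _ (by simp_all), pvUpd_get_self]
      · rw [ih (by simp_all) (by simp_all), pvUpd_get_ne _ _ _ _ hck]

theorem pvOuter_keys (rounds : List (List (String × Int))) (f : PySem.Dict String Int) :
    (rounds.foldl (fun f round => (PySem.Dict.ofList round).keys.foldl (pvUpd (PySem.Dict.ofList round)) f) f).keys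
      = PySem.Set.update f.keys (rounds.flatMap (fun round => (PySem.Dict.ofList round).keys)) := by
  induction rounds generalizing f with
  | nil => rfl
  | cons r t ih =>
      rw [List.foldl_cons, ih, pvInner_keys]
      simp [PySem.Set.update, List.foldl_append]

theorem pvOuter_get (rounds : List (List (String × Int))) (c : String) (f : PySem.Dict String Int) :
    (rounds.foldl (fun f round => (PySem.Dict.ofList round).keys.foldl (pvUpd (PySem.Dict.ofList round)) f) f).get? c
      = (pvVals rounds c).foldl pvMerge (f.get? c) := by
  induction rounds generalizing f with
  | nil => rfl
  | cons r t ih =>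
      rw [List.foldl_cons, ih]
      unfold pvVals
      rw [List.filterMap_cons]
      rcases hg : (PySem.Dict.ofList r).get? c with _ | v
      · rw [pvInner_get_not_mem _ _ _ (by
          rw [← PySem.Dict.get?_eq_none_iff_not_mem_keys]; exact hg)]
      · have hm : c ∈ (PySem.Dict.ofList r).keys := by
          by_contra hc
          rw [← PySem.Dict.get?_eq_none_iff_not_mem_keys] at hc
          simp [hg] at hc
        rw [pvInner_get_mem _ _ _ (PySem.Dict.nodup_keys_ofList r) hm, List.foldl_cons,
          PySem.Dict.getD_of_get?_eq_some _ 0 hg]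

theorem pvMerge_foldl_some (t : List Int) (a : Int) :
    t.foldl pvMerge (some a) = some (t.foldl max a) := by
  induction t generalizing a with
  | nil => rfl
  | cons x xs ih => rw [List.foldl_cons, List.foldl_cons]; exact ih (max a x)

theorem pv_main (game : List (String × List (List (String × Int)))) :
    fewest_cubes_per_game game = fewest_cubes_per_game_alt game := by
  have hA : fewest_cubes_per_game game
      = (((PySem.Dict.ofList game).getD "rounds" []).foldl
          (fun f round => (PySem.Dict.ofList round).keys.foldl (pvUpd (PySem.Dict.ofList round)) f)
          PySem.Dict.empty).items := rfl
  set R := (PySem.Dict.ofList game).getD "rounds" [] with hR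
  set F := R.foldl
      (fun f round => (PySem.Dict.ofList round).keys.foldl (pvUpd (PySem.Dict.ofList round)) f)
      PySem.Dict.empty with hF
  set L := R.flatMap (fun round => (PySem.Dict.ofList round).keys) with hL
  have hkeys : F.keys = PySem.Set.ofList L := by
    rw [hF, pvOuter_keys]; rfl
  have hnd : F.keys.Nodup := by rw [hkeys]; exact PySem.Set.nodup_ofList L
  rw [hA, PySem.Dict.items_eq_map_keys F hnd 0, hkeys]
  have hB : fewest_cubes_per_game_alt game
      = (PySem.List.dedup L).map (fun c =>
          (c, match PySem.List.max? (R.filterMap (fun round => (PySem.Dict.ofList round).get? c)) (fun v => v) with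
              | some m => m
              | none => 0)) := rfl
  rw [hB, PySem.List.dedup_eq_ofList]
  apply List.map_congr_left
  intro c hc
  have hcL : c ∈ L := (PySem.Set.mem_ofList L c).1 hc
  obtain ⟨r, hr, hck⟩ := List.mem_flatMap.1 hcL
  have hsome : (PySem.Dict.ofList r).get? c ≠ none := by
    intro h
    exact ((PySem.Dict.get?_eq_none_iff_not_mem_keys _ _).1 h) hck
  obtain ⟨v, hv⟩ := Option.ne_none_iff_exists'.1 hsome
  have hne : pvVals R c ≠ [] := by
    have : v ∈ pvVals R c := List.mem_filterMap.2 ⟨r, hr, hv⟩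
    intro h; rw [h] at this; simp at this
  rcases hvals : pvVals R c with _ | ⟨v0, t⟩
  · exact absurd hvals hne
  · have hget : F.get? c = some (t.foldl max v0) := by
      rw [hF, pvOuter_get]
      show (pvVals R c).foldl pvMerge none = _
      rw [hvals, List.foldl_cons]
      exact pvMerge_foldl_some t v0
    have hvals' : R.filterMap (fun round => (PySem.Dict.ofList round).get? c) = v0 :: t := hvals
    rw [hvals', PySem.List.max?_id_cons, PySem.Dict.getD_eq_get?_getD, hget]
    rfl

-- ===== VERDICT (by name: the statement is the Claim_ definition above) =====
theorem fewest_cubes_per_game_spec : Claim_equal_fewest_cubes_per_game := by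
  intro game _ _
  exact pv_main game
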